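-- pv_equiv track=rewrite | github.com/pypi-data/pypi-mirror-29 | packages/qet-tb-generator/qet_tb_generator-0.7.73.tar.gz/qet_tb_generator-0.7.73/src/main.py | _getXMLHead
-- ===== SOURCE A (Python) =====
-- def _getXMLHead (totalWith, totalHeight, sUUID, name):
--     """Return the starting of the XML for a element
--     @param totalWith
--     @param totalHeight
--     @param sUUID
--     @param name
--     @return list with XML content
--     """
--
--     #Round to the next tenth
--     totalWithRoundedUp = totalWith + 1  # +1 to force round the next tenth
--     while (totalWithRoundedUp % 10): totalWithRoundedUp += 1  # next tenth
--
--     totalHeightRoundedUp = totalHeight + 1  # +1 to force round the next tenth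
--     while (totalHeightRoundedUp % 10): totalHeightRoundedUp += 1  # next tenth
--
--     return ['<definition link_type="simple" hotspot_x="0" hotspot_y="0" width="%i" type="element" orientation="dyyy" height="%i" >' \
--             % (totalWithRoundedUp, totalHeightRoundedUp),
--             '  <uuid uuid="%s"/>' % sUUID,
--             '  <names>',
--             '    <name lang="en">%s</name>' % name,
--             '  </names>',
--             '  <informations></informations>',
--             '  <description>']
-- ===== SOURCE B (Python) =====
-- def _roundup10(x):
--     # smallest multiple of 10 strictly greater than x (Python % is nonnegative for divisor 10)
--     return x - x % 10 + 10
--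
-- def _getXMLHead(totalWith, totalHeight, sUUID, name):
--     """Return the starting of the XML for a element (attribute list + join)."""
--     attrs = [('link_type', 'simple'), ('hotspot_x', '0'), ('hotspot_y', '0'),
--              ('width', str(_roundup10(totalWith))), ('type', 'element'),
--              ('orientation', 'dyyy'), ('height', str(_roundup10(totalHeight)))]
--     head = '<definition ' + ' '.join('%s="%s"' % kv for kv in attrs) + ' >'
--     return [head,
--             '  <uuid uuid="%s"/>' % sUUID,
--             '  <names>',
--             '    <name lang="en">%s</name>' % name,
--             '  </names>',
--             '  <informations></informations>',
--             '  <description>']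
-- ===== Notes on version B (the rewrite author's own statement) =====
-- stated objective: alternative
-- what changed: Rounding is the closed form x - x % 10 + 10 instead of the increment-until-divisible while-loop, and the header line is assembled from an attribute key/value list joined with ' ' instead of one format string.
import Mathlib
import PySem

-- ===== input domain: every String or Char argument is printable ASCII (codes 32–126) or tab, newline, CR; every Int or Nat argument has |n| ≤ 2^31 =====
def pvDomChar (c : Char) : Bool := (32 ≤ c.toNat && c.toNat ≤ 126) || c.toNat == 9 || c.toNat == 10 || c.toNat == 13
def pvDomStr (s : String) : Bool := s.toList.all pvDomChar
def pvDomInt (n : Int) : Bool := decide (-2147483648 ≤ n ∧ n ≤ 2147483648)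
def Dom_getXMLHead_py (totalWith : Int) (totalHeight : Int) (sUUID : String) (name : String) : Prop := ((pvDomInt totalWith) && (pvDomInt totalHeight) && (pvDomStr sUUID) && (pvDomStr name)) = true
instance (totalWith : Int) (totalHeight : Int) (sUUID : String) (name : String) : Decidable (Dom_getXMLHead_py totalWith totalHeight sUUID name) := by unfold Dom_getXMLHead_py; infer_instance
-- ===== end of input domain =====

-- ===== PORT A =====
-- B builds the header from an attribute list joined with ' ' and rounds with x - x%10 + 10 (simpler decomposition).
-- A's while-loop 'x += 1 until x % 10 == 0', transliterated as recursion (fuel 10 is a pure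
-- totality guard: the loop always stops within 10 steps, proved in pyNextTenthFuel_eq below)
def pyNextTenthFuel : Nat → Int → Int
  | 0, x => x
  | Nat.succ f, x => if PySem.Int.mod x 10 = 0 then x else pyNextTenthFuel f (x + 1)

def pyNextTenth (x : Int) : Int := pyNextTenthFuel 10 x

def getXMLHead_py (totalWith : Int) (totalHeight : Int) (sUUID : String) (name : String) : List String :=
  let totalWithRoundedUp := pyNextTenth (totalWith + 1)
  let totalHeightRoundedUp := pyNextTenth (totalHeight + 1)
  ["<definition link_type=\"simple\" hotspot_x=\"0\" hotspot_y=\"0\" width=\"" ++ PySem.Int.toStr totalWithRoundedUp ++ "\" type=\"element\" orientation=\"dyyy\" height=\"" ++ PySem.Int.toStr totalHeightRoundedUp ++ "\" >",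
   "  <uuid uuid=\"" ++ sUUID ++ "\"/>",
   "  <names>",
   "    <name lang=\"en\">" ++ name ++ "</name>",
   "  </names>",
   "  <informations></informations>",
   "  <description>"]

-- ===== PORT B =====
def roundup10 (x : Int) : Int := x - PySem.Int.mod x 10 + 10

def getXMLHead_py_alt (totalWith : Int) (totalHeight : Int) (sUUID : String) (name : String) : List String :=
  let attrs : List (String × String) :=
    [("link_type", "simple"), ("hotspot_x", "0"), ("hotspot_y", "0"),
     ("width", PySem.Int.toStr (roundup10 totalWith)), ("type", "element"),
     ("orientation", "dyyy"), ("height", PySem.Int.toStr (roundup10 totalHeight))]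
  let head := "<definition " ++ PySem.Str.join " " (attrs.map (fun kv => kv.1 ++ "=\"" ++ kv.2 ++ "\"")) ++ " >"
  [head,
   "  <uuid uuid=\"" ++ sUUID ++ "\"/>",
   "  <names>",
   "    <name lang=\"en\">" ++ name ++ "</name>",
   "  </names>",
   "  <informations></informations>",
   "  <description>"]

-- ===== PRECONDITION & SPEC =====
def Spec_getXMLHead_py (totalWith : Int) (totalHeight : Int) (sUUID : String) (name : String) (out : List String) : Prop := out = getXMLHead_py_alt totalWith totalHeight sUUID name
instance (totalWith : Int) (totalHeight : Int) (sUUID : String) (name : String) (out : List String) : Decidable (Spec_getXMLHead_py totalWith totalHeight sUUID name out) := by unfold Spec_getXMLHead_py; infer_instance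

-- ===== CLAIM (what is proved, stated in full; the proofs are below) =====
def Claim_equal_getXMLHead_py : Prop := ∀ (totalWith : Int) (totalHeight : Int) (sUUID : String) (name : String), Dom_getXMLHead_py totalWith totalHeight sUUID name → Spec_getXMLHead_py totalWith totalHeight sUUID name (getXMLHead_py totalWith totalHeight sUUID name)

-- ===== LEMMAS AND PROOFS =====
theorem pyNextTenthFuel_eq (f : Nat) : ∀ x : Int, ((10 - x % 10) % 10).toNat ≤ f →
    pyNextTenthFuel f x = x - (x - 1) % 10 + 9 := by
  induction f with
  | zero => intro x h; simp only [pyNextTenthFuel]; omega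
  | succ f ih =>
    intro x h
    simp only [pyNextTenthFuel, PySem.Int.mod_eq_emod_of_pos (by norm_num : (0:Int) < 10)]
    split
    · omega
    · rw [ih (x + 1) (by omega)]; omega

theorem pyNextTenth_eq_roundup (x : Int) : pyNextTenth (x + 1) = roundup10 x := by
  unfold pyNextTenth roundup10
  rw [PySem.Int.mod_eq_emod_of_pos (by norm_num : (0:Int) < 10),
      pyNextTenthFuel_eq 10 (x + 1) (by omega)]
  omega

theorem header_eq (a b : String) :
    "<definition link_type=\"simple\" hotspot_x=\"0\" hotspot_y=\"0\" width=\"" ++ a ++ "\" type=\"element\" orientation=\"dyyy\" height=\"" ++ b ++ "\" >" =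
    "<definition " ++ PySem.Str.join " "
      (([("link_type", "simple"), ("hotspot_x", "0"), ("hotspot_y", "0"),
         ("width", a), ("type", "element"),
         ("orientation", "dyyy"), ("height", b)] : List (String × String)).map
        (fun kv => kv.1 ++ "=\"" ++ kv.2 ++ "\"")) ++ " >" := by
  apply String.ext
  simp [PySem.Chars.join, List.intercalate]

-- ===== VERDICT (by name: the statement is the Claim_ definition above) =====
theorem getXMLHead_py_spec : Claim_equal_getXMLHead_py := by
  intro totalWith totalHeight sUUID name _
  unfold Spec_getXMLHead_py getXMLHead_py getXMLHead_py_alt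
  rw [pyNextTenth_eq_roundup, pyNextTenth_eq_roundup]
  exact congrArg (fun h => h :: ["  <uuid uuid=\"" ++ sUUID ++ "\"/>", "  <names>",
      "    <name lang=\"en\">" ++ name ++ "</name>", "  </names>",
      "  <informations></informations>", "  <description>"])
    (header_eq (PySem.Int.toStr (roundup10 totalWith)) (PySem.Int.toStr (roundup10 totalHeight)))
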